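-- pv_equiv track=rewrite | github.com/Ankit-Ahirrao/Real_Interview_Problems | Algorithms/MinimumUniqueArraySum/MinimumUniqueArraySum.py | getMinimumUniqueSum
-- ===== SOURCE A (Python) =====
-- def getMinimumUniqueSum(arr):
--     mem = set()
--     for i in range(len(arr)):
--         if arr[i] not in mem:
--             mem.add(arr[i])
--         else:
--             while (arr[i] in mem):
--                 arr[i] += 1
--             mem.add(arr[i])
--     return sum(arr)
-- ===== SOURCE B (Python) =====
-- def getMinimumUniqueSum(arr):
--     total = 0
--     cur = None
--     for v in sorted(arr):
--         if cur is None or v > cur: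
--             cur = v
--         else:
--             cur = cur + 1
--         total += cur
--     return total
-- ===== Notes on version B (the rewrite author's own statement) =====
-- stated objective: faster
-- what changed: Replaced the per-element linear membership probing (a while loop that increments until the value leaves the set) by sort-then-sweep: sort ascending and assign cur = v if v > cur else cur+1, accumulating the sum in one pass.
import Mathlib
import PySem

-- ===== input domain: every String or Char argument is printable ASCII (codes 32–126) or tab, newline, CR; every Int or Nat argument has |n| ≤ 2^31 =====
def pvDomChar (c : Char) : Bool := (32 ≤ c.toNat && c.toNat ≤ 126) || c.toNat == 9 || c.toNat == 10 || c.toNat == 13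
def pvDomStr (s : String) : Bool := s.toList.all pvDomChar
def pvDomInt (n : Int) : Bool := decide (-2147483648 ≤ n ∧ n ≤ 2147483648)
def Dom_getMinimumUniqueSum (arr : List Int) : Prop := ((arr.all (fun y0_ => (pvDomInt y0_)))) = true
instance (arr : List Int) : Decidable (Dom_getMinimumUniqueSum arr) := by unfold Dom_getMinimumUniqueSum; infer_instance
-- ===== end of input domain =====

-- B sorts ascending and sweeps with cur = max(v, cur+1) instead of A's per-element
-- membership probing; equivalence is about the RETURN value only (Python A mutates
-- its argument list in place, B does not).

-- ===== PORT A =====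

-- termination helpers for A's inner `while arr[i] in mem: arr[i] += 1` loop
theorem pvFilterLe_mono (mem : List Int) (x : Int) :
    (mem.filter (fun y => decide (x + 1 ≤ y))).length ≤ (mem.filter (fun y => decide (x ≤ y))).length := by
  induction mem with
  | nil => simp
  | cons h t ih =>
    rw [List.filter_cons, List.filter_cons]
    by_cases h1 : x + 1 ≤ h
    · rw [if_pos (by simpa using h1), if_pos (by simp; omega)]
      rw [List.length_cons, List.length_cons]; omega
    · by_cases h2 : x ≤ h
      · rw [if_neg (by simpa using h1), if_pos (by simpa using h2)]
        rw [List.length_cons]; omega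
      · rw [if_neg (by simpa using h1), if_neg (by simpa using h2)]; exact ih

theorem pvFilterLe_lt (mem : List Int) (x : Int) (hx : x ∈ mem) :
    (mem.filter (fun y => decide (x + 1 ≤ y))).length < (mem.filter (fun y => decide (x ≤ y))).length := by
  induction mem with
  | nil => simp at hx
  | cons h t ih =>
    rw [List.filter_cons, List.filter_cons]
    rcases List.mem_cons.mp hx with h1 | h1
    · subst h1
      rw [if_neg (by simp), if_pos (by simp)]
      rw [List.length_cons]
      have := pvFilterLe_mono t x
      omega
    · have hlt := ih h1
      by_cases ha : x + 1 ≤ h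
      · rw [if_pos (by simpa using ha), if_pos (by simp; omega)]
        rw [List.length_cons, List.length_cons]; omega
      · by_cases hb : x ≤ h
        · rw [if_neg (by simpa using ha), if_pos (by simpa using hb)]
          rw [List.length_cons]; omega
        · rw [if_neg (by simpa using ha), if_neg (by simpa using hb)]; exact hlt

-- the `while arr[i] in mem: arr[i] += 1` loop of A
def bumpWhile (mem : List Int) (x : Int) : Int :=
  if h : x ∈ mem then bumpWhile mem (x + 1) else x
termination_by (mem.filter (fun y => decide (x ≤ y))).length
decreasing_by exact pvFilterLe_lt mem x h

-- A's loop body: state is (mem, the mutated prefix of arr)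
def stepA (st : PySem.Set Int × List Int) (v : Int) : PySem.Set Int × List Int :=
  if PySem.Set.contains st.1 v = false then
    (PySem.Set.add st.1 v, st.2 ++ [v])
  else
    let w := bumpWhile st.1 v
    (PySem.Set.add st.1 w, st.2 ++ [w])

def getMinimumUniqueSum (arr : List Int) : Int :=
  (arr.foldl stepA (PySem.Set.empty, [])).2.sum

-- ===== PORT B =====

-- B's loop body: state is (cur, total)
def stepB (st : Option Int × Int) (v : Int) : Option Int × Int :=
  let w : Int := match st.1 with
    | none => v
    | some c => if c < v then v else c + 1
  (some w, st.2 + w)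

def getMinimumUniqueSum_alt (arr : List Int) : Int :=
  ((PySem.List.sorted arr (fun x => x) false).foldl stepB (none, 0)).2

-- ===== PRECONDITION & SPEC =====
def Spec_getMinimumUniqueSum (arr : List Int) (out : Int) : Prop := out = getMinimumUniqueSum_alt arr
instance (arr : List Int) (out : Int) : Decidable (Spec_getMinimumUniqueSum arr out) := by unfold Spec_getMinimumUniqueSum; infer_instance

-- ===== CLAIM (what is proved, stated in full; the proofs are below) =====
def Claim_equal_getMinimumUniqueSum : Prop := ∀ (arr : List Int), Dom_getMinimumUniqueSum arr → Spec_getMinimumUniqueSum arr (getMinimumUniqueSum arr)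

-- ===== LEMMAS AND PROOFS =====

-- mathematical model: nf S x = least y ≥ x with y ∉ S; F inserts it
def nf (S : Finset Int) (x : Int) : Int :=
  if h : x ∈ S then nf S (x + 1) else x
termination_by ((S.filter (fun y => x ≤ y)).card)
decreasing_by
  apply Finset.card_lt_card
  constructor
  · intro y hy
    simp only [Finset.mem_filter] at hy ⊢
    exact ⟨hy.1, by omega⟩
  · intro hsub
    have hx : x ∈ S.filter (fun y => x ≤ y) := by
      simp only [Finset.mem_filter]; exact ⟨h, le_refl x⟩
    have := hsub hx
    simp only [Finset.mem_filter] at this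
    omega

def F (S : Finset Int) (x : Int) : Finset Int := insert (nf S x) S

theorem nf_spec (S : Finset Int) (x : Int) :
    x ≤ nf S x ∧ nf S x ∉ S ∧ ∀ y, x ≤ y → y < nf S x → y ∈ S := by
  fun_induction nf S x with
  | case1 x h ih =>
    refine ⟨by omega, ih.2.1, fun y hy1 hy2 => ?_⟩
    by_cases hyx : y = x
    · subst hyx; exact h
    · exact ih.2.2 y (by omega) hy2
  | case2 x h =>
    exact ⟨le_refl x, h, fun y hy1 hy2 => absurd hy2 (by omega)⟩

theorem nf_eq_of (S : Finset Int) (x m : Int) (h1 : x ≤ m) (h2 : m ∉ S)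
    (h3 : ∀ y, x ≤ y → y < m → y ∈ S) : nf S x = m := by
  obtain ⟨ha, hb, hc⟩ := nf_spec S x
  rcases lt_trichotomy (nf S x) m with h | h | h
  · exact absurd (h3 _ ha h) hb
  · exact h
  · exact absurd (hc m h1 h) h2

theorem nf_insert (S : Finset Int) (a y : Int) :
    nf (insert a S) y = if nf S y = a then nf S (a + 1) else nf S y := by
  obtain ⟨hy1, hy2, hy3⟩ := nf_spec S y
  by_cases h : nf S y = a
  · rw [if_pos h]
    obtain ⟨ha1, ha2, ha3⟩ := nf_spec S (a + 1)
    apply nf_eq_of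
    · omega
    · simp only [Finset.mem_insert]
      push Not
      exact ⟨by omega, ha2⟩
    · intro z hz1 hz2
      simp only [Finset.mem_insert]
      by_cases hza : z = a
      · exact Or.inl hza
      · rcases lt_or_ge z a with hlt | hge
        · exact Or.inr (hy3 z hz1 (by omega))
        · exact Or.inr (ha3 z (by omega) hz2)
  · rw [if_neg h]
    apply nf_eq_of
    · exact hy1
    · simp only [Finset.mem_insert]; push Not; exact ⟨h, hy2⟩
    · intro z hz1 hz2
      exact Finset.mem_insert_of_mem (hy3 z hz1 hz2)

theorem F_comm (S : Finset Int) (x y : Int) : F (F S x) y = F (F S y) x := by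
  by_cases h : nf S x = nf S y
  · simp only [F, nf_insert, h]
  · simp only [F, nf_insert]
    rw [if_neg (fun hc => h hc.symm), if_neg h]
    exact Finset.insert_comm _ _ _

theorem bumpWhile_eq_nf (mem : List Int) (x : Int) :
    bumpWhile mem x = nf mem.toFinset x := by
  fun_induction bumpWhile mem x with
  | case1 x h ih =>
    rw [nf, dif_pos (List.mem_toFinset.mpr h)]
    exact ih
  | case2 x h =>
    rw [nf, dif_neg (fun hc => h (List.mem_toFinset.mp hc))]

-- A's fold maintains: out = mem, mem nodup, mem.toFinset = foldl F
theorem A_fold_inv (l : List Int) : ∀ (mem : List Int), mem.Nodup →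
    (l.foldl stepA (mem, mem)).2 = (l.foldl stepA (mem, mem)).1
      ∧ ((l.foldl stepA (mem, mem)).1).Nodup
      ∧ ((l.foldl stepA (mem, mem)).1).toFinset = l.foldl F mem.toFinset := by
  induction l with
  | nil => intro mem h; exact ⟨rfl, h, rfl⟩
  | cons v t ih =>
    intro mem hmem
    have hc : PySem.Set.contains mem v = decide (v ∈ mem) := by
      simp [PySem.Set.contains]
    by_cases hv : v ∈ mem
    · have hfalse : ¬ (PySem.Set.contains mem v = false) := by
        rw [hc]; simp [hv]
      have hw : bumpWhile mem v = nf mem.toFinset v := bumpWhile_eq_nf mem v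
      have hwnot : bumpWhile mem v ∉ mem := by
        rw [hw]
        intro hcon
        exact (nf_spec mem.toFinset v).2.1 (List.mem_toFinset.mpr hcon)
      have hadd : PySem.Set.add mem (bumpWhile mem v) = mem ++ [bumpWhile mem v] := by
        simp [PySem.Set.add, PySem.Set.contains, hwnot]
      have hstep : stepA (mem, mem) v = (mem ++ [bumpWhile mem v], mem ++ [bumpWhile mem v]) := by
        rw [stepA, if_neg hfalse]
        simp [hadd]
      simp only [List.foldl_cons, hstep]
      have hnodup : (mem ++ [bumpWhile mem v]).Nodup := by
        rw [List.nodup_append]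
        refine ⟨hmem, List.nodup_singleton _, ?_⟩
        intro a ha b hb
        rw [List.mem_singleton] at hb
        subst hb
        exact fun h => hwnot (h ▸ ha)
      have := ih (mem ++ [bumpWhile mem v]) hnodup
      refine ⟨this.1, this.2.1, ?_⟩
      rw [this.2.2]
      congr 1
      simp only [F, List.toFinset_append, List.toFinset_cons, List.toFinset_nil, hw]
      ext z
      simp only [Finset.mem_union, Finset.mem_insert, Finset.notMem_empty, or_false]
      tauto
    · have htrue : PySem.Set.contains mem v = false := by
        rw [hc]; simp [hv]
      have hadd : PySem.Set.add mem v = mem ++ [v] := by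
        simp [PySem.Set.add, PySem.Set.contains, hv]
      have hstep : stepA (mem, mem) v = (mem ++ [v], mem ++ [v]) := by
        rw [stepA, if_pos htrue]
        simp [hadd]
      simp only [List.foldl_cons, hstep]
      have hnodup : (mem ++ [v]).Nodup := by
        rw [List.nodup_append]
        refine ⟨hmem, List.nodup_singleton _, ?_⟩
        intro a ha b hb
        rw [List.mem_singleton] at hb
        subst hb
        exact fun h => hv (h ▸ ha)
      have := ih (mem ++ [v]) hnodup
      refine ⟨this.1, this.2.1, ?_⟩
      rw [this.2.2]
      congr 1
      have hnf : nf mem.toFinset v = v :=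
        nf_eq_of _ _ _ (le_refl v) (fun hcon => hv (List.mem_toFinset.mp hcon))
          (fun y h1 h2 => absurd h2 (by omega))
      simp only [F, List.toFinset_append, List.toFinset_cons, List.toFinset_nil, hnf]
      ext z
      simp only [Finset.mem_union, Finset.mem_insert, Finset.notMem_empty, or_false]
      tauto

theorem A_eq_Fsum (arr : List Int) :
    getMinimumUniqueSum arr = (arr.foldl F ∅).sum id := by
  unfold getMinimumUniqueSum
  have h := A_fold_inv arr [] List.nodup_nil
  have he : (PySem.Set.empty : PySem.Set Int) = ([] : List Int) := rfl
  rw [he, h.1]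
  have hsum : ((arr.foldl stepA ([], [])).1).sum = ((arr.foldl stepA ([], [])).1).toFinset.sum id := by
    rw [List.sum_toFinset _ h.2.1]
    simp
  rw [hsum, h.2.2]
  simp

-- B's sweep over a sorted list computes the same Finset sum
theorem sweep_inv (l : List Int) : ∀ (S : Finset Int) (c total : Int),
    l.Pairwise (· ≤ ·) →
    (∀ s ∈ S, s ≤ c) →
    (∀ y v, v ∈ l → v ≤ y → y ≤ c → y ∈ S) →
    total = S.sum id →
    (l.foldl stepB (some c, total)).2 = (l.foldl F S).sum id := by
  induction l with
  | nil => intro S c total _ _ _ ht; simpa using ht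
  | cons v t ih =>
    intro S c total hp hS hfull ht
    have hvt : ∀ u ∈ t, v ≤ u := (List.pairwise_cons.mp hp).1
    have hpt : t.Pairwise (· ≤ ·) := (List.pairwise_cons.mp hp).2
    by_cases hcv : c < v
    · have hvnot : v ∉ S := fun hcon => by have := hS v hcon; omega
      have hnf : nf S v = v :=
        nf_eq_of _ _ _ (le_refl v) hvnot (fun y h1 h2 => absurd h2 (by omega))
      have hstep : stepB (some c, total) v = (some v, total + v) := by
        simp [stepB, hcv]
      simp only [List.foldl_cons, hstep]
      rw [ih (insert v S) v (total + v) hpt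
        (by intro s hs
            rcases Finset.mem_insert.mp hs with h | h
            · omega
            · have := hS s h; omega)
        (by intro y u hu h1 h2
            have := hvt u hu
            have hyv : y = v := by omega
            exact Finset.mem_insert.mpr (Or.inl hyv))
        (by rw [Finset.sum_insert hvnot, ← ht]; simp only [id_eq]; omega)]
      simp only [F, hnf]
    · have hvc : v ≤ c := by omega
      have hsub : ∀ y, v ≤ y → y ≤ c → y ∈ S := fun y h1 h2 =>
        hfull y v (List.mem_cons_self) h1 h2
      have hc1not : c + 1 ∉ S := fun hcon => by have := hS _ hcon; omega
      have hnf : nf S v = c + 1 :=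
        nf_eq_of _ _ _ (by omega) hc1not (fun y h1 h2 => hsub y h1 (by omega))
      have hstep : stepB (some c, total) v = (some (c + 1), total + (c + 1)) := by
        simp [stepB, hcv]
      simp only [List.foldl_cons, hstep]
      rw [ih (insert (c + 1) S) (c + 1) (total + (c + 1)) hpt
        (by intro s hs
            rcases Finset.mem_insert.mp hs with h | h
            · omega
            · have := hS s h; omega)
        (by intro y u hu h1 h2
            have hvu := hvt u hu
            by_cases hy : y = c + 1
            · exact Finset.mem_insert.mpr (Or.inl hy)
            · exact Finset.mem_insert_of_mem (hsub y (by omega) (by omega)))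
        (by rw [Finset.sum_insert hc1not, ← ht]; simp only [id_eq]; omega)]
      simp only [F, hnf]

theorem B_eq_Fsum (arr : List Int) :
    getMinimumUniqueSum_alt arr = ((PySem.List.sorted arr (fun x => x) false).foldl F ∅).sum id := by
  unfold getMinimumUniqueSum_alt
  have hp : (PySem.List.sorted arr (fun x => x) false).Pairwise (· ≤ ·) := by
    have := PySem.List.sorted_pairwise (xs := arr) (key := fun x => x)
    simpa using this
  cases hs : PySem.List.sorted arr (fun x => x) false with
  | nil => simp
  | cons x xs =>
    rw [hs] at hp
    have hpt := (List.pairwise_cons.mp hp).2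
    have hvt := (List.pairwise_cons.mp hp).1
    have hnf : nf ∅ x = x :=
      nf_eq_of _ _ _ (le_refl x) (by simp) (fun y h1 h2 => absurd h2 (by omega))
    have hstep : stepB (none, 0) x = (some x, 0 + x) := by simp [stepB]
    simp only [List.foldl_cons, hstep]
    have := sweep_inv xs {x} x (0 + x) hpt
      (by intro s hs'; have := Finset.mem_singleton.mp hs'; omega)
      (by intro y u hu h1 h2
          have := hvt u hu
          have hyx : y = x := by omega
          simp [hyx])
      (by simp)
    rw [this]
    simp only [F, hnf, Finset.insert_empty]

-- ===== VERDICT =====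
theorem getMinimumUniqueSum_spec : Claim_equal_getMinimumUniqueSum := by
  intro arr _
  unfold Spec_getMinimumUniqueSum
  rw [A_eq_Fsum, B_eq_Fsum]
  congr 1
  exact ((PySem.List.sorted_perm (xs := arr) (key := fun x => x) (rev := false)).symm.foldl_eq'
    (fun x _ y _ z => F_comm z x y) ∅)
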